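-- pv_equiv track=rewrite | github.com/m-zakeri/CodA | main.py | checkCoverWithSideAndDetour
-- ===== SOURCE A (Python) =====
-- def checkCoverWithSideAndDetour(primepath, exepath):
--     exe_length = len(exepath)
--     prime_length = len(primepath)
--     for i in range(exe_length - prime_length + 1):
--         j = 0
--         k = 0
--         if exepath[i + j] == primepath[k]:
--             j += 1
--             k += 1
--             while k < prime_length and i + j < exe_length:
--                 if exepath[i + j] == primepath[k]:  # tour directly
--                     j += 1
--                     k += 1
--                 elif primepath[k] in exepath[i + j:]:  # tour with detour
--                     j += exepath[i + j:].index(primepath[k])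
--                     k += 1
--                 elif primepath[k - 1] in exepath[i + j:]:  # tour with sidetrip
--                     j += exepath[i + j:].index(primepath[k - 1]) + 1
--                 else:
--                     break
--             if k == prime_length:
--                 return True
--     return False
-- ===== SOURCE B (Python) =====
-- def checkCoverWithSideAndDetour(primepath, exepath):
--     n = len(exepath)
--     m = len(primepath)
--     # earliest admissible anchor of primepath[0] among the allowed starts;
--     # later anchors can never succeed where the earliest one fails (the
--     # greedy chain is antitone in its starting position), and the sidetrip
--     # branch of the original can never change the final verdict, so one
--     # single left-to-right pass decides coverage.
--     start = None
--     for i in range(n - m + 1):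
--         if exepath[i] == primepath[0]:
--             start = i
--             break
--     if start is None:
--         return False
--     p = start + 1
--     k = 1
--     while k < m:
--         if p >= n:
--             return False
--         if exepath[p] == primepath[k]:
--             p += 1                      # tour directly: consume the position
--         else:
--             p += 1
--             while p < n and exepath[p] != primepath[k]:
--                 p += 1                  # scan to the next occurrence (detour)
--             if p >= n:
--                 return False
--             # land on the occurrence itself, as the detour does
--         k += 1
--     return True
-- ===== Notes on version B (the rewrite author's own statement) =====
-- stated objective: alternative
-- what changed: B drops A's outer loop over all start positions and its per-step slice+in+.index scans entirely: it finds only the earliest admissible anchor of primepath[0] and runs a single left-to-right two-pointer pass over exepath, justified by two facts about A's search (the greedy chain is antitone in its start position, and A's sidetrip branch can never lead to success).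
import Mathlib
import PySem

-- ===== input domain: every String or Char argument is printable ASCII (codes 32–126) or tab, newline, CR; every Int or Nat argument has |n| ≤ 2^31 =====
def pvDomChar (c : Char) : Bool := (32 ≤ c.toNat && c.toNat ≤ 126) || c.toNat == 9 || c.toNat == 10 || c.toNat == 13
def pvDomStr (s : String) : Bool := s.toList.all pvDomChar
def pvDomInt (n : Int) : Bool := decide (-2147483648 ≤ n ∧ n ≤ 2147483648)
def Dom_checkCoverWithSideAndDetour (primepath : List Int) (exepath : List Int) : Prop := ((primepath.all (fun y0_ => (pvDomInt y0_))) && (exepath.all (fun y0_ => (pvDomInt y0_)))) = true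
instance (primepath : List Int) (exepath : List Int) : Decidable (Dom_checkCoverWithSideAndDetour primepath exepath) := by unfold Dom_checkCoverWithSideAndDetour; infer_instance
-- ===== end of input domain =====

-- B replaces A's all-starts search (slice + `in` + `.index` at every step) by a single
-- left-to-right pass from the earliest anchor of primepath[0] (alternative algorithm).
-- Loops are ported with a structural fuel parameter; each fuel budget is provably adequate
-- (each loop step advances its measure), so fuel exhaustion is unreachable.

-- ===== PORT A =====

-- the while-loop of A: state (j, k), returns the final k; Python's `in` test then `.index`
-- are the two separate scans membership and index?; `xs[i+j:]` is drop via slice_from_natCast.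
-- fuel ≥ exepath.length - (i + j) is adequate: the position i + j grows every iteration,
-- so fuel 0 implies i + j ≥ exepath.length and the while-condition is false (returns k).
def aLoop (primepath exepath : List Int) (i : Nat) : Nat → Nat → Nat → Nat
  | 0, _, k => k
  | fuel + 1, j, k =>
    if k < primepath.length ∧ i + j < exepath.length then
      if exepath.getD (i + j) 0 = primepath.getD k 0 then          -- tour directly
        aLoop primepath exepath i fuel (j + 1) (k + 1)
      else if primepath.getD k 0 ∈ PySem.List.slice exepath (some ((i + j : Nat) : Int)) none then
        -- tour with detour
        aLoop primepath exepath i fuel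
          (j + (PySem.List.index? (PySem.List.slice exepath (some ((i + j : Nat) : Int)) none) (primepath.getD k 0)).getD 0)
          (k + 1)
      else if primepath.getD (k - 1) 0 ∈ PySem.List.slice exepath (some ((i + j : Nat) : Int)) none then
        -- tour with sidetrip
        aLoop primepath exepath i fuel
          (j + (PySem.List.index? (PySem.List.slice exepath (some ((i + j : Nat) : Int)) none) (primepath.getD (k - 1) 0)).getD 0 + 1)
          k
      else k
    else k

-- the for-loop over i in range(exe_length - prime_length + 1) (Nat form: exe+1-prime, empty iff the Python range is)
def aOuter (primepath exepath : List Int) : List Nat → Bool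
  | [] => false
  | i :: rest =>
    if exepath.getD i 0 = primepath.getD 0 0 then
      if aLoop primepath exepath i exepath.length 1 1 = primepath.length then true
      else aOuter primepath exepath rest
    else aOuter primepath exepath rest

def checkCoverWithSideAndDetour (primepath : List Int) (exepath : List Int) : Bool :=
  aOuter primepath exepath (List.range (exepath.length + 1 - primepath.length))

-- ===== PORT B =====

-- Source B's first for-loop: earliest start i with exepath[i] == primepath[0], else None
def bAnchor (primepath exepath : List Int) : List Nat → Option Nat
  | [] => none
  | i :: rest =>
    if exepath.getD i 0 = primepath.getD 0 0 then some i
    else bAnchor primepath exepath rest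

-- Source B's inner while: advance p until p ≥ n (none) or exepath[p] == v (some p);
-- fuel ≥ exepath.length - p is adequate (p grows each step; fuel 0 ⇒ p ≥ length ⇒ none)
def bScan (exepath : List Int) (v : Int) : Nat → Nat → Option Nat
  | 0, _ => none
  | fuel + 1, p =>
    if p < exepath.length then
      if exepath.getD p 0 = v then some p
      else bScan exepath v fuel (p + 1)
    else none

-- Source B's outer while over k: state (p, k); fuel ≥ primepath.length - k is adequate
-- (k grows each iteration; fuel 0 ⇒ k ≥ primepath.length ⇒ the loop is over, return True)
def bLoop (primepath exepath : List Int) : Nat → Nat → Nat → Bool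
  | 0, _, _ => true
  | fuel + 1, p, k =>
    if k < primepath.length then
      if p ≥ exepath.length then false
      else if exepath.getD p 0 = primepath.getD k 0 then
        bLoop primepath exepath fuel (p + 1) (k + 1)     -- tour directly: consume the position
      else
        match bScan exepath (primepath.getD k 0) exepath.length (p + 1) with
        | some t => bLoop primepath exepath fuel t (k + 1)   -- land on the occurrence (detour)
        | none => false
    else true

def checkCoverWithSideAndDetour_alt (primepath : List Int) (exepath : List Int) : Bool :=
  match bAnchor primepath exepath (List.range (exepath.length + 1 - primepath.length)) with
  | none => false
  | some start => bLoop primepath exepath primepath.length (start + 1) 1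

-- ===== PRECONDITION & SPEC =====
-- Pre_ excludes only empty primepath, on which Python A (and B) raise IndexError at primepath[0].
def Pre_checkCoverWithSideAndDetour (primepath : List Int) (exepath : List Int) : Prop := primepath ≠ []
instance (primepath : List Int) (exepath : List Int) : Decidable (Pre_checkCoverWithSideAndDetour primepath exepath) := by unfold Pre_checkCoverWithSideAndDetour; infer_instance

def pvWitness_checkCoverWithSideAndDetour : List Int × List Int := ([1, 2], [1, 3, 2])

def Spec_checkCoverWithSideAndDetour (primepath : List Int) (exepath : List Int) (out : Bool) : Prop := out = checkCoverWithSideAndDetour_alt primepath exepath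
instance (primepath : List Int) (exepath : List Int) (out : Bool) : Decidable (Spec_checkCoverWithSideAndDetour primepath exepath out) := by unfold Spec_checkCoverWithSideAndDetour; infer_instance

-- ===== CLAIM (what is proved, stated in full; the proofs are below) =====
def Claim_equal_checkCoverWithSideAndDetour : Prop := ∀ (primepath : List Int) (exepath : List Int), Dom_checkCoverWithSideAndDetour primepath exepath → Pre_checkCoverWithSideAndDetour primepath exepath → Spec_checkCoverWithSideAndDetour primepath exepath (checkCoverWithSideAndDetour primepath exepath)

-- ===== LEMMAS AND PROOFS =====

-- `.index` of a value found in the slice is ≥ 1 when exepath[p] itself differs from it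
theorem pvIdxPos {exe : List Int} {p : Nat} {v : Int} (hp : p < exe.length)
    (hne : exe.getD p 0 ≠ v) {idx : Nat}
    (h : PySem.List.index? (exe.drop p) v = some idx) : 1 ≤ idx := by
  obtain ⟨hk, hv, -⟩ := PySem.List.getElem_of_index?_eq_some h
  rcases Nat.eq_zero_or_pos idx with h0 | h1
  · subst h0
    rw [List.getElem_drop] at hv
    rw [List.getD_eq_getElem exe 0 (by omega)] at hne
    simp only [Nat.add_zero] at hv
    exact absurd hv hne
  · exact h1

theorem drop_mono_notmem {exe : List Int} {v : Int} {a b : Nat} (hab : a ≤ b)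
    (h : v ∉ exe.drop a) : v ∉ exe.drop b := by
  intro hb
  apply h
  have : exe.drop b = (exe.drop a).drop (b - a) := by
    rw [List.drop_drop]
    congr 1
    omega
  rw [this] at hb
  exact List.drop_subset _ _ hb

theorem getD_mem_drop {exe : List Int} {p t : Nat} (hpt : p ≤ t) (ht : t < exe.length) :
    exe.getD t 0 ∈ exe.drop p := by
  rw [List.mem_iff_getElem]
  refine ⟨t - p, by rw [List.length_drop]; omega, ?_⟩
  rw [List.getElem_drop, List.getD_eq_getElem exe 0 ht]
  congr 1
  omega

-- characterisation of bScan under adequate fuel: some t = first occurrence of v at an index ≥ p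
theorem bScan_some {exe : List Int} {v : Int} :
    ∀ {fuel p t : Nat}, exe.length - p ≤ fuel → bScan exe v fuel p = some t →
    p ≤ t ∧ t < exe.length ∧ exe.getD t 0 = v ∧ ∀ u, p ≤ u → u < t → exe.getD u 0 ≠ v := by
  intro fuel
  induction fuel with
  | zero =>
    intro p t hf h
    exact absurd h (by simp [bScan])
  | succ n ih =>
    intro p t hf h
    rw [bScan] at h
    by_cases hp : p < exe.length
    · rw [if_pos hp] at h
      by_cases hv : exe.getD p 0 = v
      · rw [if_pos hv] at h
        cases h
        exact ⟨le_refl _, hp, hv, fun u h1 h2 => by omega⟩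
      · rw [if_neg hv] at h
        obtain ⟨h1, h2, h3, h4⟩ := ih (p := p + 1) (by omega) h
        refine ⟨by omega, h2, h3, ?_⟩
        intro u hu1 hu2
        rcases Nat.eq_or_lt_of_le hu1 with rfl | hlt
        · exact hv
        · exact h4 u hlt hu2
    · rw [if_neg hp] at h
      exact absurd h (by simp)

theorem bScan_none {exe : List Int} {v : Int} :
    ∀ {fuel p : Nat}, exe.length - p ≤ fuel → bScan exe v fuel p = none →
    ∀ u, p ≤ u → u < exe.length → exe.getD u 0 ≠ v := by
  intro fuel
  induction fuel with
  | zero =>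
    intro p hf h u h1 h2
    omega
  | succ n ih =>
    intro p hf h u h1 h2
    rw [bScan] at h
    by_cases hp : p < exe.length
    · rw [if_pos hp] at h
      by_cases hv : exe.getD p 0 = v
      · rw [if_pos hv] at h; exact absurd h (by simp)
      · rw [if_neg hv] at h
        rcases Nat.eq_or_lt_of_le h1 with rfl | hlt
        · exact hv
        · exact ih (by omega) h u hlt h2
    · omega

theorem bScan_found {exe : List Int} {v : Int} {fuel p t : Nat} (hfuel : exe.length - p ≤ fuel)
    (hpt : p ≤ t) (ht : t < exe.length) (hv : exe.getD t 0 = v) :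
    ∃ t', bScan exe v fuel p = some t' ∧ t' ≤ t := by
  cases h : bScan exe v fuel p with
  | none => exact absurd hv (bScan_none hfuel h t hpt ht)
  | some t' =>
    obtain ⟨h1, h2, h3, h4⟩ := bScan_some hfuel h
    refine ⟨t', rfl, ?_⟩
    by_contra hc
    exact h4 t hpt (by omega) hv

theorem bScan_eq_of_first {exe : List Int} {v : Int} {fuel q t : Nat}
    (hfuel : exe.length - q ≤ fuel)
    (hq : q ≤ t) (ht : t < exe.length) (hv : exe.getD t 0 = v)
    (hmin : ∀ u, q ≤ u → u < t → exe.getD u 0 ≠ v) :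
    bScan exe v fuel q = some t := by
  obtain ⟨t', hsc, ht'le⟩ := bScan_found hfuel hq ht hv
  obtain ⟨h1, h2, h3, h4⟩ := bScan_some hfuel hsc
  rcases Nat.eq_or_lt_of_le ht'le with rfl | hlt
  · exact hsc
  · exact absurd h3 (hmin t' h1 hlt)

theorem bScan_none_of_notmem {exe : List Int} {v : Int} {fuel p : Nat}
    (hfuel : exe.length - (p + 1) ≤ fuel) (h : v ∉ exe.drop p) :
    bScan exe v fuel (p + 1) = none := by
  cases hs : bScan exe v fuel (p + 1) with
  | none => rfl
  | some t =>
    obtain ⟨h1, h2, h3, -⟩ := bScan_some hfuel hs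
    exact absurd (h3 ▸ getD_mem_drop (by omega) h2) h

-- sidetrips are dead: once prime[k] no longer occurs in exe[i+j:], aLoop returns k
theorem aLoop_dead (primepath exepath : List Int) :
    ∀ (fuel i j k : Nat),
    primepath.getD k 0 ∉ exepath.drop (i + j) →
    aLoop primepath exepath i fuel j k = k := by
  intro fuel
  induction fuel with
  | zero =>
    intro i j k hmem
    rfl
  | succ n ih =>
    intro i j k hmem
    rw [aLoop]
    by_cases hg : k < primepath.length ∧ i + j < exepath.length
    · rw [if_pos hg]
      have hdir : exepath.getD (i + j) 0 ≠ primepath.getD k 0 := by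
        intro h
        apply hmem
        rw [List.drop_eq_getElem_cons (by omega : i + j < exepath.length)]
        rw [← h, List.getD_eq_getElem exepath 0 (by omega)]
        exact List.mem_cons_self
      rw [if_neg hdir]
      rw [if_neg (show ¬ primepath.getD k 0 ∈ PySem.List.slice exepath (some ((i + j : Nat) : Int)) none by
        rw [PySem.List.slice_from_natCast]; exact hmem)]
      by_cases hside : primepath.getD (k - 1) 0 ∈ PySem.List.slice exepath (some ((i + j : Nat) : Int)) none
      · rw [if_pos hside]
        exact ih i _ k (drop_mono_notmem (by omega) hmem)
      · rw [if_neg hside]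
    · rw [if_neg hg]

-- bLoop is antitone in the position: success from p gives success from any p' ≤ p
theorem bLoop_mono (primepath exepath : List Int) :
    ∀ (fuel k p p' : Nat), p' ≤ p →
    bLoop primepath exepath fuel p k = true → bLoop primepath exepath fuel p' k = true := by
  intro fuel
  induction fuel with
  | zero =>
    intro k p p' hpp h
    rfl
  | succ n ih =>
    intro k p p' hpp h
    rw [bLoop] at h ⊢
    by_cases hk : k < primepath.length
    · rw [if_pos hk] at h ⊢
      by_cases hp : p ≥ exepath.length
      · rw [if_pos hp] at h; exact absurd h (by simp)
      · rw [if_neg hp] at h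
        rw [if_neg (show ¬ p' ≥ exepath.length by omega)]
        set v := primepath.getD k 0 with hv
        -- extract the matched occurrence tstar and the continuation position
        have hnext : ∃ tstar next, exepath.getD tstar 0 = v ∧ tstar < exepath.length ∧
            p ≤ tstar ∧ tstar ≤ next ∧ p + 1 ≤ next ∧
            bLoop primepath exepath n next (k + 1) = true := by
          by_cases hd : exepath.getD p 0 = v
          · rw [if_pos hd] at h
            exact ⟨p, p + 1, hd, by omega, le_refl _, by omega, le_refl _, h⟩
          · rw [if_neg hd] at h
            cases hscan : bScan exepath v exepath.length (p + 1) with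
            | none => rw [hscan] at h; exact absurd h (by simp)
            | some t =>
              rw [hscan] at h
              obtain ⟨h1, h2, h3, -⟩ := bScan_some (by omega) hscan
              exact ⟨t, t, h3, h2, by omega, le_refl _, h1, h⟩
        obtain ⟨tstar, next, hts_v, hts_lt, hts_ge, hts_le, hnext_ge, hcont⟩ := hnext
        by_cases hd' : exepath.getD p' 0 = v
        · rw [if_pos hd']
          exact ih (k + 1) next (p' + 1) (by omega) hcont
        · rw [if_neg hd']
          have hts_ge' : p' + 1 ≤ tstar := by
            rcases Nat.eq_or_lt_of_le hpp with rfl | hlt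
            · rcases Nat.eq_or_lt_of_le hts_ge with rfl | h2
              · exact absurd hts_v hd'
              · omega
            · rcases Nat.eq_or_lt_of_le hts_ge with rfl | h2
              · omega
              · omega
          obtain ⟨t', hsc, ht'le⟩ := bScan_found (fuel := exepath.length) (by omega) hts_ge' hts_lt hts_v
          rw [hsc]
          exact ih (k + 1) next t' (by omega) hcont
    · rw [if_neg hk] at h
      rw [if_neg hk]

-- A's while-loop reaches k = m exactly when B's single pass from the same position succeeds
theorem loop_iff (primepath exepath : List Int) :
    ∀ (fa i j k fb : Nat), exepath.length - (i + j) ≤ fa → k ≤ primepath.length →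
    primepath.length - k ≤ fb →
    (aLoop primepath exepath i fa j k = primepath.length ↔
      bLoop primepath exepath fb (i + j) k = true) := by
  intro fa
  induction fa with
  | zero =>
    intro i j k fb hf hk hfb
    show (k = primepath.length ↔ _)
    by_cases hklt : k < primepath.length
    · cases fb with
      | zero => omega
      | succ n =>
        rw [bLoop, if_pos hklt, if_pos (by omega : i + j ≥ exepath.length)]
        simp
        omega
    · cases fb with
      | zero => simp [bLoop]; omega
      | succ n =>
        rw [bLoop, if_neg hklt]
        simp
        omega
  | succ n ih =>
    intro i j k fb hf hk hfb
    rw [aLoop]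
    by_cases hg : k < primepath.length ∧ i + j < exepath.length
    · rw [if_pos hg]
      obtain ⟨fb', rfl⟩ : ∃ fb', fb = fb' + 1 := ⟨fb - 1, by omega⟩
      rw [bLoop, if_pos hg.1, if_neg (show ¬ i + j ≥ exepath.length by omega)]
      by_cases hd : exepath.getD (i + j) 0 = primepath.getD k 0
      · rw [if_pos hd, if_pos hd]
        have := ih i (j + 1) (k + 1) fb' (by omega) (by omega) (by omega)
        rw [← Nat.add_assoc] at this
        exact this
      · rw [if_neg hd, if_neg hd]
        by_cases hm : primepath.getD k 0 ∈ PySem.List.slice exepath (some ((i + j : Nat) : Int)) none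
        · rw [if_pos hm]
          rw [PySem.List.slice_from_natCast] at hm ⊢
          obtain ⟨idx, hidx⟩ := Option.isSome_iff_exists.mp
            ((PySem.List.index?_isSome_iff _ _).mpr hm)
          obtain ⟨hklen, hkv, hkmin⟩ := PySem.List.getElem_of_index?_eq_some hidx
          rw [List.length_drop] at hklen
          have hpos : 1 ≤ idx := pvIdxPos (by omega) hd hidx
          rw [List.getElem_drop] at hkv
          have hvT : exepath.getD (i + j + idx) 0 = primepath.getD k 0 := by
            rw [List.getD_eq_getElem exepath 0 (by omega)]
            exact hkv
          have hscan : bScan exepath (primepath.getD k 0) exepath.length (i + j + 1) =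
              some (i + j + idx) := by
            apply bScan_eq_of_first (by omega) (by omega) (by omega) hvT
            intro u hu1 hu2 hu3
            apply hkmin (u - (i + j)) (by omega)
            rw [List.getElem_drop]
            simp only [show i + j + (u - (i + j)) = u from by omega]
            rw [List.getD_eq_getElem exepath 0 (by omega)] at hu3
            exact hu3
          rw [hidx, hscan]
          simp only [Option.getD_some]
          have := ih i (j + idx) (k + 1) fb' (by omega) (by omega) (by omega)
          rw [← Nat.add_assoc] at this
          exact this
        · rw [if_neg hm]
          rw [PySem.List.slice_from_natCast] at hm
          rw [bScan_none_of_notmem (by omega) hm]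
          constructor
          · intro h
            exfalso
            by_cases hside : primepath.getD (k - 1) 0 ∈ PySem.List.slice exepath (some ((i + j : Nat) : Int)) none
            · rw [if_pos hside] at h
              rw [aLoop_dead primepath exepath n i _ k
                (drop_mono_notmem (by omega) hm)] at h
              omega
            · rw [if_neg hside] at h
              omega
          · intro h
            exact absurd h (by simp)
    · rw [if_neg hg]
      rcases Nat.lt_or_ge k primepath.length with hklt | hkge
      · obtain ⟨fb', rfl⟩ : ∃ fb', fb = fb' + 1 := ⟨fb - 1, by omega⟩
        rw [bLoop, if_pos hklt, if_pos (by omega : i + j ≥ exepath.length)]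
        simp
        omega
      · cases fb with
        | zero => simp [bLoop]; omega
        | succ m =>
          rw [bLoop, if_neg (by omega)]
          simp
          omega

-- aOuter succeeds iff some listed start anchors and completes
theorem aOuter_iff (primepath exepath : List Int) (l : List Nat) :
    aOuter primepath exepath l = true ↔
    ∃ i ∈ l, exepath.getD i 0 = primepath.getD 0 0 ∧
      aLoop primepath exepath i exepath.length 1 1 = primepath.length := by
  induction l with
  | nil => simp [aOuter]
  | cons i rest ih =>
    rw [aOuter]
    by_cases ha : exepath.getD i 0 = primepath.getD 0 0
    · rw [if_pos ha]
      by_cases hl : aLoop primepath exepath i exepath.length 1 1 = primepath.length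
      · rw [if_pos hl]
        simp only [true_iff]
        exact ⟨i, List.mem_cons_self, ha, hl⟩
      · rw [if_neg hl, ih]
        constructor
        · rintro ⟨x, hx, h1, h2⟩
          exact ⟨x, List.mem_cons_of_mem _ hx, h1, h2⟩
        · rintro ⟨x, hx, h1, h2⟩
          rcases List.mem_cons.mp hx with rfl | hx'
          · exact absurd h2 hl
          · exact ⟨x, hx', h1, h2⟩
    · rw [if_neg ha, ih]
      constructor
      · rintro ⟨x, hx, h1, h2⟩
        exact ⟨x, List.mem_cons_of_mem _ hx, h1, h2⟩
      · rintro ⟨x, hx, h1, h2⟩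
        rcases List.mem_cons.mp hx with rfl | hx'
        · exact absurd h1 ha
        · exact ⟨x, hx', h1, h2⟩

-- bAnchor on a <-sorted list: none = no anchor; some i0 = the least anchor
theorem bAnchor_none {primepath exepath : List Int} {l : List Nat}
    (h : bAnchor primepath exepath l = none) :
    ∀ i ∈ l, exepath.getD i 0 ≠ primepath.getD 0 0 := by
  induction l with
  | nil => simp
  | cons x rest ih =>
    rw [bAnchor] at h
    by_cases hx : exepath.getD x 0 = primepath.getD 0 0
    · rw [if_pos hx] at h
      exact absurd h (by simp)
    · rw [if_neg hx] at h
      intro i hi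
      rcases List.mem_cons.mp hi with rfl | hi'
      · exact hx
      · exact ih h i hi'

theorem bAnchor_some {primepath exepath : List Int} {l : List Nat} (hs : l.Pairwise (· < ·))
    {i0 : Nat} (h : bAnchor primepath exepath l = some i0) :
    i0 ∈ l ∧ exepath.getD i0 0 = primepath.getD 0 0 ∧
    ∀ i ∈ l, exepath.getD i 0 = primepath.getD 0 0 → i0 ≤ i := by
  induction l with
  | nil => exact absurd h (by simp [bAnchor])
  | cons x rest ih =>
    rw [bAnchor] at h
    by_cases hx : exepath.getD x 0 = primepath.getD 0 0
    · rw [if_pos hx] at h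
      cases h
      refine ⟨List.mem_cons_self, hx, ?_⟩
      intro i hi _
      rcases List.mem_cons.mp hi with rfl | hi'
      · exact le_refl _
      · exact le_of_lt (List.rel_of_pairwise_cons hs hi')
    · rw [if_neg hx] at h
      obtain ⟨h1, h2, h3⟩ := ih (List.Pairwise.sublist (List.sublist_cons_self x rest) hs) h
      refine ⟨List.mem_cons_of_mem _ h1, h2, ?_⟩
      intro i hi ha
      rcases List.mem_cons.mp hi with rfl | hi'
      · exact absurd ha hx
      · exact h3 i hi' ha

-- ===== VERDICT (by name: the statement is the Claim_ definition above) =====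
theorem checkCoverWithSideAndDetour_spec : Claim_equal_checkCoverWithSideAndDetour := by
  intro primepath exepath _ hpre
  unfold Spec_checkCoverWithSideAndDetour checkCoverWithSideAndDetour checkCoverWithSideAndDetour_alt
  have hm : 1 ≤ primepath.length := by
    cases primepath with
    | nil => exact absurd rfl hpre
    | cons x xs => simp
  set l := List.range (exepath.length + 1 - primepath.length) with hl
  cases hanc : bAnchor primepath exepath l with
  | none =>
    rw [← Bool.not_eq_true, aOuter_iff]
    rintro ⟨i, hi, ha, -⟩
    exact bAnchor_none hanc i hi ha
  | some i0 =>
    obtain ⟨hmem, hanc0, hmin⟩ := bAnchor_some List.pairwise_lt_range hanc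
    rw [Bool.eq_iff_iff, aOuter_iff]
    constructor
    · rintro ⟨i, hi, ha, hdone⟩
      have hb : bLoop primepath exepath primepath.length (i + 1) 1 = true :=
        (loop_iff primepath exepath exepath.length i 1 1 primepath.length
          (by omega) hm (by omega)).mp hdone
      exact bLoop_mono primepath exepath primepath.length 1 (i + 1) (i0 + 1)
        (by have := hmin i hi ha; omega) hb
    · intro hb
      refine ⟨i0, hmem, hanc0, ?_⟩
      exact (loop_iff primepath exepath exepath.length i0 1 1 primepath.length
        (by omega) hm (by omega)).mpr hb
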